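-- pv_equiv track=rewrite | github.com/LightD31/michel-discord-bot | features/secretsanta/assignments.py | _build_valid_receivers
-- ===== SOURCE A (Python) =====
-- def is_valid_assignment(giver: int, receiver: int, banned_pairs: list[tuple[int, int]]) -> bool:
--     """True iff ``giver → receiver`` is not listed in ``banned_pairs`` (symmetric)."""
--     return not any(
--         (giver == p1 and receiver == p2) or (giver == p2 and receiver == p1)
--         for p1, p2 in banned_pairs
--     )
--
-- def _build_valid_receivers(
--     participant_ids: list[int], banned_pairs: list[tuple[int, int]]
-- ) -> dict[int, list[int]]:
--     return {
--         giver: [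
--             receiver
--             for receiver in participant_ids
--             if receiver != giver and is_valid_assignment(giver, receiver, banned_pairs)
--         ]
--         for giver in participant_ids
--     }
-- ===== SOURCE B (Python) =====
-- def _build_valid_receivers(participant_ids, banned_pairs):
--     # Build full candidate lists once, then subtract banned partners in one
--     # pass over banned_pairs (instead of testing every pair against all bans).
--     result = {g: [r for r in participant_ids if r != g] for g in participant_ids}
--     for p1, p2 in banned_pairs:
--         if p1 in result:
--             result[p1] = [r for r in result[p1] if r != p2]
--         if p2 in result:
--             result[p2] = [r for r in result[p2] if r != p1]
--     return result
-- ===== Notes on version B (the rewrite author's own statement) =====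
-- stated objective: faster
-- what changed: Instead of testing every (giver, receiver) pair against the whole banned_pairs list, B builds the full candidate lists once and then makes a single pass over banned_pairs, filtering the banned partner out of the affected giver's list.
import Mathlib
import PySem

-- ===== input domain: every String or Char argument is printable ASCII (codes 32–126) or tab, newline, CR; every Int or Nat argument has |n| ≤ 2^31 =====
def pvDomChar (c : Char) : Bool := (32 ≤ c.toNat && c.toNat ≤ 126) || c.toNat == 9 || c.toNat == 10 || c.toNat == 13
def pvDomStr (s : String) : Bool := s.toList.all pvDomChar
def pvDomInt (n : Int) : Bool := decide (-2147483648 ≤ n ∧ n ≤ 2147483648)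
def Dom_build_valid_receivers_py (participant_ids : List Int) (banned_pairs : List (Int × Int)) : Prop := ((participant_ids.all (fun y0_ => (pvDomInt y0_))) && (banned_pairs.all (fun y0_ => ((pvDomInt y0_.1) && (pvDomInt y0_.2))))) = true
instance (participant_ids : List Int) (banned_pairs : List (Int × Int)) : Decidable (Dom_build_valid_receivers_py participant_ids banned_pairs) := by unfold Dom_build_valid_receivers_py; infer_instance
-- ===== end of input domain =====

-- B builds the full candidate lists once, then subtracts banned partners in a single
-- pass over banned_pairs, instead of testing every (giver, receiver) pair against all bans.

-- ===== PORT A =====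
-- helper: Python is_valid_assignment
def is_valid_assignment (giver receiver : Int) (banned_pairs : List (Int × Int)) : Bool :=
  !(banned_pairs.any (fun p => (giver == p.1 && receiver == p.2) || (giver == p.2 && receiver == p.1)))

def build_valid_receivers_py (participant_ids : List Int) (banned_pairs : List (Int × Int)) : List (Int × List Int) :=
  (participant_ids.foldl
    (fun d g => d.insert g
      (participant_ids.filter (fun r => r != g && is_valid_assignment g r banned_pairs)))
    PySem.Dict.empty).items

-- ===== PORT B =====
def build_valid_receivers_py_alt (participant_ids : List Int) (banned_pairs : List (Int × Int)) : List (Int × List Int) :=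
  let base : PySem.Dict Int (List Int) :=
    participant_ids.foldl
      (fun d g => d.insert g (participant_ids.filter (fun r => r != g))) PySem.Dict.empty
  (banned_pairs.foldl
    (fun d p =>
      let d1 := if d.contains p.1 then d.insert p.1 ((d.getD p.1 []).filter (fun r => r != p.2)) else d
      if d1.contains p.2 then d1.insert p.2 ((d1.getD p.2 []).filter (fun r => r != p.1)) else d1)
    base).items

-- ===== PRECONDITION & SPEC =====
def Spec_build_valid_receivers_py (participant_ids : List Int) (banned_pairs : List (Int × Int)) (out : List (Int × List Int)) : Prop := out = build_valid_receivers_py_alt participant_ids banned_pairs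
instance (participant_ids : List Int) (banned_pairs : List (Int × Int)) (out : List (Int × List Int)) : Decidable (Spec_build_valid_receivers_py participant_ids banned_pairs out) := by unfold Spec_build_valid_receivers_py; infer_instance

-- ===== CLAIM (what is proved, stated in full; the proofs are below) =====
def Claim_equal_build_valid_receivers_py : Prop := ∀ (participant_ids : List Int) (banned_pairs : List (Int × Int)), Dom_build_valid_receivers_py participant_ids banned_pairs → Spec_build_valid_receivers_py participant_ids banned_pairs (build_valid_receivers_py participant_ids banned_pairs)

-- ===== LEMMAS AND PROOFS =====

def pairOk (p : Int × Int) (g r : Int) : Bool :=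
  !((g == p.1 && r == p.2) || (g == p.2 && r == p.1))

def stepB (d : PySem.Dict Int (List Int)) (p : Int × Int) : PySem.Dict Int (List Int) :=
  let d1 := if d.contains p.1 then d.insert p.1 ((d.getD p.1 []).filter (fun r => r != p.2)) else d
  if d1.contains p.2 then d1.insert p.2 ((d1.getD p.2 []).filter (fun r => r != p.1)) else d1

theorem is_valid_eq_all (g r : Int) (bps : List (Int × Int)) :
    is_valid_assignment g r bps = bps.all (fun p => pairOk p g r) := by
  induction bps with
  | nil => rfl
  | cons p t ih =>
    simp only [is_valid_assignment, pairOk, List.any_cons, List.all_cons] at ih ⊢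
    rw [← ih]
    cases h : (g == p.1 && r == p.2 || (g == p.2 && r == p.1)) <;> simp_all

theorem keys_filterBranch (d : PySem.Dict Int (List Int)) (k t : Int) :
    (if d.contains k then d.insert k ((d.getD k []).filter (fun r => r != t)) else d).keys = d.keys := by
  split_ifs with h
  · exact PySem.Dict.keys_insert_of_contains d _ h
  · rfl

theorem keys_stepB (d : PySem.Dict Int (List Int)) (p : Int × Int) :
    (stepB d p).keys = d.keys := by
  unfold stepB
  rw [keys_filterBranch, keys_filterBranch]

theorem getD_filterBranch (d : PySem.Dict Int (List Int)) (k t g : Int) :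
    (if d.contains k then d.insert k ((d.getD k []).filter (fun r => r != t)) else d).getD g []
      = if g = k then (d.getD k []).filter (fun r => r != t) else d.getD g [] := by
  by_cases h : d.contains k = true
  · rw [if_pos h, PySem.Dict.getD_insert]
  · rw [if_neg h]
    by_cases hg : g = k
    · subst hg
      rw [if_pos rfl, PySem.Dict.getD_of_not_contains d _ (by simpa using h), List.filter_nil]
    · rw [if_neg hg]

theorem getD_stepB (d : PySem.Dict Int (List Int)) (p : Int × Int) (g : Int) :
    (stepB d p).getD g [] = (d.getD g []).filter (fun r => pairOk p g r) := by
  unfold stepB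
  rw [getD_filterBranch, getD_filterBranch, getD_filterBranch]
  by_cases h2 : g = p.2 <;> by_cases h1 : g = p.1
  · rw [if_pos h2, if_pos (h2.symm.trans h1), List.filter_filter, ← h1]
    apply List.filter_congr
    intro r _
    simp [pairOk, ← h1, ← h2, bne]
  · have hb1 : (g == p.1) = false := by simpa using h1
    rw [if_pos h2, if_neg (fun e => h1 (h2.trans e)), ← h2]
    apply List.filter_congr
    intro r _
    simp [pairOk, ← h2, hb1, bne]
  · have hb2 : (g == p.2) = false := by simpa using h2
    rw [if_neg h2, if_pos h1, ← h1]
    apply List.filter_congr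
    intro r _
    simp [pairOk, ← h1, hb2, bne]
  · have hb1 : (g == p.1) = false := by simpa using h1
    have hb2 : (g == p.2) = false := by simpa using h2
    rw [if_neg h2, if_neg h1]
    symm
    apply List.filter_eq_self.mpr
    intro r _
    simp [pairOk, hb1, hb2]

theorem keys_foldB (bps : List (Int × Int)) (d : PySem.Dict Int (List Int)) :
    (bps.foldl stepB d).keys = d.keys := by
  induction bps generalizing d with
  | nil => rfl
  | cons p t ih => rw [List.foldl_cons, ih, keys_stepB]

theorem getD_foldB (bps : List (Int × Int)) (d : PySem.Dict Int (List Int)) (g : Int) :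
    (bps.foldl stepB d).getD g [] = (d.getD g []).filter (fun r => bps.all (fun p => pairOk p g r)) := by
  induction bps generalizing d with
  | nil =>
    symm
    apply List.filter_eq_self.mpr
    intro r _
    rfl
  | cons p t ih =>
    rw [List.foldl_cons, ih, getD_stepB, List.filter_filter]
    apply List.filter_congr
    intro r _
    simp only [List.all_cons]
    cases pairOk p g r <;> simp

theorem getD_build (f : Int → List Int) (l : List Int) (d : PySem.Dict Int (List Int)) (k : Int) :
    (l.foldl (fun d g => d.insert g (f g)) d).getD k [] = if k ∈ l then f k else d.getD k [] := by
  induction l generalizing d with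
  | nil => simp
  | cons g t ih =>
    rw [List.foldl_cons, ih]
    by_cases ht : k ∈ t
    · rw [if_pos ht, if_pos (List.mem_cons_of_mem _ ht)]
    · rw [if_neg ht, PySem.Dict.getD_insert]
      by_cases hk : k = g
      · subst hk
        rw [if_pos rfl, if_pos (List.mem_cons_self ..)]
      · rw [if_neg hk, if_neg (by simp [hk, ht])]

-- ===== VERDICT (by name: the statement is the Claim_ definition above) =====
theorem build_valid_receivers_py_spec : Claim_equal_build_valid_receivers_py := by
  intro l bps _
  unfold Spec_build_valid_receivers_py build_valid_receivers_py build_valid_receivers_py_alt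
  have hfun : (fun (d : PySem.Dict Int (List Int)) (p : Int × Int) =>
      let d1 := if d.contains p.1 then d.insert p.1 ((d.getD p.1 []).filter (fun r => r != p.2)) else d
      if d1.contains p.2 then d1.insert p.2 ((d1.getD p.2 []).filter (fun r => r != p.1)) else d1) = stepB := rfl
  simp only [hfun]
  have hnA : (l.foldl (fun d g => d.insert g
      (l.filter (fun r => r != g && is_valid_assignment g r bps))) PySem.Dict.empty).keys.Nodup :=
    PySem.Dict.nodup_keys_foldl_insert l _ _ PySem.Dict.nodup_keys_empty
  have hkA : (l.foldl (fun d g => d.insert g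
      (l.filter (fun r => r != g && is_valid_assignment g r bps))) PySem.Dict.empty).keys
      = PySem.Set.ofList l := by
    rw [PySem.Dict.keys_foldl_insert, PySem.Dict.keys_empty, PySem.Set.update_nil_left]
  have hkB0 : (l.foldl (fun d g => d.insert g (l.filter (fun r => r != g))) PySem.Dict.empty).keys
      = PySem.Set.ofList l := by
    rw [PySem.Dict.keys_foldl_insert, PySem.Dict.keys_empty, PySem.Set.update_nil_left]
  have hkB : (bps.foldl stepB (l.foldl (fun d g => d.insert g (l.filter (fun r => r != g)))
      PySem.Dict.empty)).keys = PySem.Set.ofList l := by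
    rw [keys_foldB, hkB0]
  have hnB : (bps.foldl stepB (l.foldl (fun d g => d.insert g (l.filter (fun r => r != g)))
      PySem.Dict.empty)).keys.Nodup := by
    rw [hkB, ← hkA]; exact hnA
  rw [PySem.Dict.items_eq_map_keys _ hnA [], PySem.Dict.items_eq_map_keys _ hnB [], hkA, hkB]
  apply List.map_congr_left
  intro k hk
  have hkl : k ∈ l := (PySem.Set.mem_ofList l k).mp hk
  have hA := getD_build (fun g => l.filter (fun r => r != g && is_valid_assignment g r bps)) l
    PySem.Dict.empty k
  have hB := getD_build (fun g => l.filter (fun r => r != g)) l PySem.Dict.empty k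
  rw [if_pos hkl] at hA hB
  rw [Prod.mk.injEq]
  refine ⟨rfl, ?_⟩
  rw [hA, getD_foldB, hB, List.filter_filter]
  apply List.filter_congr
  intro r _
  rw [is_valid_eq_all]
  cases r != k <;> cases bps.all (fun p => pairOk p k r) <;> simp
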